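-- pv_equiv track=rewrite | github.com/Uthaeus/codewars_python | 7kyu/simple_reversal.py | solve
-- ===== SOURCE A (Python) =====
-- def solve(s):
--     letters = []
--     result = ""
--     x = -1
--
--     for char in s:
--         if char != ' ':
--             letters.append(char)
--
--     for char in s:
--         if char == ' ':
--             result += ' '
--         else:
--             result += letters[x]
--             x -= 1
--
--     return result
-- ===== SOURCE B (Python) =====
-- def solve(s):
--     chars = list(s)
--     i, j = 0, len(chars) - 1
--     while i < j:
--         if chars[i] == ' ':
--             i += 1
--         elif chars[j] == ' ':
--             j -= 1
--         else:
--             chars[i], chars[j] = chars[j], chars[i]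
--             i += 1
--             j -= 1
--     return ''.join(chars)
-- ===== Notes on version B (the rewrite author's own statement) =====
-- stated objective: alternative
-- what changed: Replaces A's two forward passes (extract non-space chars into a list, then rebuild the string indexing that list from the back) by a single in-place two-pointer pass that swaps non-space characters from both ends converging to the middle.
import Mathlib
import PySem

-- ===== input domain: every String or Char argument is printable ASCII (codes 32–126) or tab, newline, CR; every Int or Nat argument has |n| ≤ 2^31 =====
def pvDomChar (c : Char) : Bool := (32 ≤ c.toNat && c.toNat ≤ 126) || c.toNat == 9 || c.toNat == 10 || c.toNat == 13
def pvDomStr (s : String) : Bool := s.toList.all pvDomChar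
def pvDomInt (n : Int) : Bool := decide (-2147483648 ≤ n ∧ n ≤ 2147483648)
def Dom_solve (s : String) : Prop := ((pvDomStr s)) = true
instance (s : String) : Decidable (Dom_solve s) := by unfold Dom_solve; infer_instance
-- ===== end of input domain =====

-- B replaces A's two forward passes (collect non-spaces, rebuild indexing from the back)
-- by a single converging two-pointer pass swapping non-space chars in place; same result, same O(n) cost.

-- ===== PORT A =====
-- letters[x] with x = -1, -2, …: the index is always in range (one non-space consumed per
-- non-space char), so pyGetD is exact here and A is total.
def solve (s : String) : String :=
  let letters : List Char :=
    s.toList.foldl (fun letters c => if c ≠ ' ' then letters ++ [c] else letters) []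
  let st :=
    s.toList.foldl
      (fun (st : List Char × Int) c =>
        if c = ' ' then (st.1 ++ [' '], st.2)
        else (st.1 ++ [PySem.List.pyGetD letters st.2 ' '], st.2 - 1))
      ([], -1)
  String.ofList st.1

-- ===== PORT B =====
-- while i < j loop of Source B; inside the loop 0 ≤ i < j < chars.length always holds,
-- so pyGetD/idx.toNat are exact for Python's chars[i]/chars[j] and the swap assignment.
def solveAltLoop (chars : List Char) (i j : Int) : List Char :=
  if h : i < j then
    let ci := PySem.List.pyGetD chars i ' '
    let cj := PySem.List.pyGetD chars j ' '
    if ci = ' ' then solveAltLoop chars (i + 1) j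
    else if cj = ' ' then solveAltLoop chars i (j - 1)
    else solveAltLoop ((chars.set i.toNat cj).set j.toNat ci) (i + 1) (j - 1)
  else chars
termination_by (j - i).toNat
decreasing_by all_goals omega

-- ''.join over the char list = String.ofList
def solve_alt (s : String) : String :=
  String.ofList (solveAltLoop s.toList 0 ((s.toList.length : Int) - 1))

-- ===== PRECONDITION & SPEC =====
def Spec_solve (s : String) (out : String) : Prop := out = solve_alt s
instance (s : String) (out : String) : Decidable (Spec_solve s out) := by unfold Spec_solve; infer_instance

-- ===== CLAIM (what is proved, stated in full; the proofs are below) =====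
def Claim_equal_solve : Prop := ∀ (s : String), Dom_solve s → Spec_solve s (solve s)

-- ===== LEMMAS AND PROOFS =====

-- number of non-space characters
def nsCount (cs : List Char) : Nat := (cs.filter (· ≠ ' ')).length

-- replace the non-space chars of cs, in order, by the chars of rev (keep cs's char if rev runs dry)
def rebuild : List Char → List Char → List Char
  | [], _ => []
  | c :: cs, rev =>
    if c = ' ' then ' ' :: rebuild cs rev
    else
      match rev with
      | r :: rs => r :: rebuild cs rs
      | [] => c :: rebuild cs []

-- the common specification: reverse the non-space chars keeping spaces in place
def revNS (cs : List Char) : List Char := rebuild cs (cs.filter (· ≠ ' ')).reverse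

theorem rebuild_append (xs ys rev : List Char) :
    rebuild (xs ++ ys) rev = rebuild xs rev ++ rebuild ys (rev.drop (nsCount xs)) := by
  induction xs generalizing rev with
  | nil => simp [rebuild, nsCount]
  | cons c cs ih =>
    by_cases hc : c = ' '
    · simp [rebuild, hc, ih, nsCount]
    · cases rev with
      | nil => simp [rebuild, hc, ih]
      | cons r rs =>
        have : nsCount (c :: cs) = nsCount cs + 1 := by simp [nsCount, hc]
        simp [rebuild, hc, ih, this]

theorem rebuild_extra (xs rev z : List Char) (h : nsCount xs ≤ rev.length) :
    rebuild xs (rev ++ z) = rebuild xs rev := by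
  induction xs generalizing rev with
  | nil => simp [rebuild]
  | cons c cs ih =>
    by_cases hc : c = ' '
    · simp [rebuild, hc, ih rev (by simpa [nsCount, hc] using h)]
    · have hcount : nsCount (c :: cs) = nsCount cs + 1 := by simp [nsCount, hc]
      cases rev with
      | nil => simp only [List.length_nil] at h; omega
      | cons r rs =>
        have hle : nsCount cs ≤ rs.length := by
          rw [hcount] at h; simpa using h
        simp [rebuild, hc, ih rs hle]

theorem revNS_nil : revNS [] = [] := by simp [revNS, rebuild]

theorem revNS_single (c : Char) : revNS [c] = [c] := by
  by_cases hc : c = ' ' <;> simp [revNS, rebuild, hc]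

theorem revNS_space_cons (m : List Char) : revNS (' ' :: m) = ' ' :: revNS m := by
  simp [revNS, rebuild]

theorem revNS_space_concat (m : List Char) : revNS (m ++ [' ']) = revNS m ++ [' '] := by
  unfold revNS
  have hf : (m ++ [' ']).filter (· ≠ ' ') = m.filter (· ≠ ' ') := by
    rw [List.filter_append, show (([' '] : List Char).filter (· ≠ ' ')) = [] from rfl,
        List.append_nil]
  rw [hf, rebuild_append]
  congr 1

theorem revNS_swap (a b : Char) (m : List Char) (ha : a ≠ ' ') (hb : b ≠ ' ') :
    revNS (a :: m ++ [b]) = b :: revNS m ++ [a] := by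
  unfold revNS
  have hf : (a :: m ++ [b]).filter (· ≠ ' ') = a :: (m.filter (· ≠ ' ') ++ [b]) := by
    rw [List.cons_append, List.filter_cons_of_pos (by simp [ha]), List.filter_append,
        show (([b] : List Char).filter (· ≠ ' ')) = [b] by simp [hb]]
  rw [hf]
  have hrev : (a :: (m.filter (· ≠ ' ') ++ [b])).reverse
      = b :: ((m.filter (· ≠ ' ')).reverse ++ [a]) := by simp
  rw [hrev]
  have hstep : rebuild (a :: m ++ [b]) (b :: ((m.filter (· ≠ ' ')).reverse ++ [a]))
      = b :: rebuild (m ++ [b]) ((m.filter (· ≠ ' ')).reverse ++ [a]) := by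
    rw [List.cons_append]; simp [rebuild, ha]
  rw [hstep, rebuild_append]
  have hlen : nsCount m = (m.filter (· ≠ ' ')).reverse.length := by simp [nsCount]
  rw [rebuild_extra m (m.filter (· ≠ ' ')).reverse [a] (le_of_eq hlen)]
  have hdrop : ((m.filter (· ≠ ' ')).reverse ++ [a]).drop (nsCount m) = [a] := by
    rw [hlen, List.drop_append]; simp
  rw [hdrop]
  simp [rebuild, hb]

-- A's first loop collects exactly the non-space characters
theorem lettersA_eq (cs acc : List Char) :
    cs.foldl (fun letters c => if c ≠ ' ' then letters ++ [c] else letters) acc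
      = acc ++ cs.filter (· ≠ ' ') := by
  induction cs generalizing acc with
  | nil => simp
  | cons c cs ih =>
    rw [List.foldl_cons]
    by_cases hc : c = ' '
    · rw [if_neg (by simp [hc]), ih, List.filter_cons_of_neg (by simp [hc])]
    · rw [if_pos hc, ih, List.filter_cons_of_pos (by simp [hc]), List.append_assoc]
      rfl

-- A's second loop, with x = -1 - k, rebuilds using letters.reverse from position k on
theorem loopA_eq (letters : List Char) (cs : List Char) (acc : List Char) (k : Nat)
    (h : k + nsCount cs ≤ letters.length) :
    (cs.foldl
      (fun (st : List Char × Int) c =>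
        if c = ' ' then (st.1 ++ [' '], st.2)
        else (st.1 ++ [PySem.List.pyGetD letters st.2 ' '], st.2 - 1))
      (acc, -1 - (k : Int))).1
      = acc ++ rebuild cs (letters.reverse.drop k) := by
  induction cs generalizing acc k with
  | nil => simp [rebuild]
  | cons c cs ih =>
    by_cases hc : c = ' '
    · have h' : k + nsCount cs ≤ letters.length := by
        have : nsCount (c :: cs) = nsCount cs := by simp [nsCount, hc]
        omega
      simp only [List.foldl_cons, if_pos hc]
      rw [ih (acc ++ [' ']) k h']
      simp [rebuild, hc]
    · have hcount : nsCount (c :: cs) = nsCount cs + 1 := by simp [nsCount, hc]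
      have hk1 : k + 1 ≤ letters.length := by omega
      have hklt : k < letters.length := by omega
      have hget : PySem.List.pyGetD letters (-1 - (k : Int)) ' '
          = letters[letters.length - (k + 1)] := by
        have hcast : (-1 - (k : Int)) = -((k + 1 : Nat) : Int) := by push_cast; ring
        rw [hcast, PySem.List.pyGetD_neg_natCast letters (k + 1) ' ' (by omega) hk1]
      have hrev : letters.reverse.drop k
          = letters[letters.length - (k + 1)] :: letters.reverse.drop (k + 1) := by
        have hkr : k < letters.reverse.length := by simpa using hklt
        rw [List.drop_eq_getElem_cons hkr]
        congr 1
        rw [List.getElem_reverse]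
        congr 1
        omega
      simp only [List.foldl_cons, if_neg hc]
      have hx : (-1 - (k : Int)) - 1 = -1 - ((k + 1 : Nat) : Int) := by push_cast; ring
      rw [hget, hx, ih (acc ++ [letters[letters.length - (k + 1)]]) (k + 1) (by omega)]
      rw [hrev]
      simp [rebuild, hc]

theorem solve_eq_revNS (s : String) : solve s = String.ofList (revNS s.toList) := by
  unfold solve
  rw [lettersA_eq]
  simp only [List.nil_append]
  have h := loopA_eq (s.toList.filter (· ≠ ' ')) s.toList [] 0 (by simp [nsCount])
  simp only [Nat.cast_zero] at h
  norm_num at h ⊢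
  rw [h]
  simp [revNS]

-- helpers for the two-pointer lemma
theorem pyGetD_append_length (pre : List Char) (y : Char) (ys : List Char) (d : Char) :
    PySem.List.pyGetD (pre ++ y :: ys) (pre.length : Int) d = y := by
  rw [PySem.List.pyGetD_natCast]
  simp [List.getD_eq_getElem?_getD]

theorem set_append_length (pre : List Char) (y v : Char) (ys : List Char) :
    (pre ++ y :: ys).set pre.length v = pre ++ v :: ys := by
  induction pre with
  | nil => simp
  | cons p ps ih => simp [ih]

-- the two-pointer loop reverses the non-spaces of the untouched middle segment in place
theorem loopB_eq (n : Nat) : ∀ (M A B : List Char), M.length = n →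
    solveAltLoop (A ++ M ++ B) (A.length : Int) ((A.length : Int) + M.length - 1)
      = A ++ revNS M ++ B := by
  induction n using Nat.strong_induction_on with
  | _ n ih =>
    intro M A B hlen
    by_cases hsmall : M.length ≤ 1
    · rw [solveAltLoop, dif_neg (by push_cast; omega)]
      match M, hsmall with
      | [], _ => simp [revNS_nil]
      | [c], _ => simp [revNS_single]
    · rw [Nat.not_le] at hsmall
      obtain ⟨a, M₁, rfl⟩ : ∃ a M₁, M = a :: M₁ := by
        cases M with
        | nil => simp at hsmall
        | cons a M₁ => exact ⟨a, M₁, rfl⟩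
      have hM₁ : M₁ ≠ [] := by
        intro hh; rw [hh] at hsmall; simp at hsmall
      have hcond : (A.length : Int) < (A.length : Int) + (a :: M₁).length - 1 := by
        push_cast; simp only [List.length_cons] at hsmall ⊢; push_cast; omega
      rw [solveAltLoop, dif_pos hcond]
      have hci : PySem.List.pyGetD (A ++ (a :: M₁) ++ B) (A.length : Int) ' ' = a := by
        have hre : A ++ (a :: M₁) ++ B = A ++ a :: (M₁ ++ B) := by simp
        rw [hre, pyGetD_append_length]
      by_cases ha : a = ' '
      · -- skip a space on the left
        simp only [hci, if_pos ha]
        have harg : (A.length : Int) + 1 = ((A ++ [' ']).length : Int) := by push_cast; simp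
        have harg2 : (A.length : Int) + ((a :: M₁).length : Int) - 1
            = ((A ++ [' ']).length : Int) + (M₁.length : Int) - 1 := by
          simp only [List.length_append, List.length_cons, List.length_nil]; push_cast; ring
        have hre : A ++ (a :: M₁) ++ B = (A ++ [' ']) ++ M₁ ++ B := by subst ha; simp
        rw [hre, harg, harg2, ih M₁.length (by simp [← hlen]) M₁ (A ++ [' ']) B rfl]
        subst ha
        simp [revNS_space_cons]
      · -- left char is non-space; look at the right end
        obtain ⟨mid, b, hM₂⟩ : ∃ mid b, M₁ = mid ++ [b] := by
          obtain ⟨mid, b, hmb⟩ := M₁.eq_nil_or_concat.resolve_left hM₁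
          exact ⟨mid, b, by simpa [List.concat_eq_append] using hmb⟩
        subst hM₂
        have hcj : PySem.List.pyGetD (A ++ (a :: (mid ++ [b])) ++ B)
            ((A.length : Int) + ((a :: (mid ++ [b])).length : Int) - 1) ' ' = b := by
          have hre : A ++ (a :: (mid ++ [b])) ++ B = (A ++ a :: mid) ++ b :: B := by simp
          have hidx : (A.length : Int) + ((a :: (mid ++ [b])).length : Int) - 1
              = ((A ++ a :: mid).length : Int) := by push_cast; simp; ring
          rw [hre, hidx, pyGetD_append_length]
        by_cases hb : b = ' '
        · -- skip a space on the right
          simp only [hci, if_neg ha, hcj, if_pos hb]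
          have hre : A ++ (a :: (mid ++ [b])) ++ B = A ++ (a :: mid) ++ (' ' :: B) := by
            subst hb; simp
          have hidx : (A.length : Int) + ((a :: (mid ++ [b])).length : Int) - 1 - 1
              = (A.length : Int) + ((a :: mid).length : Int) - 1 := by push_cast; simp; ring
          rw [hre, hidx, ih (a :: mid).length (by simp [← hlen]) (a :: mid) A (' ' :: B) rfl]
          subst hb
          have hsp := revNS_space_concat (a :: mid)
          simp only [List.cons_append] at hsp
          simp [hsp]
        · -- swap the two non-space chars
          simp only [hci, if_neg ha, hcj, if_neg hb]
          have hswap :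
              ((A ++ (a :: (mid ++ [b])) ++ B).set ((A.length : Int)).toNat b).set
                ((A.length : Int) + ((a :: (mid ++ [b])).length : Int) - 1).toNat a
              = (A ++ [b]) ++ mid ++ (a :: B) := by
            have h1 : A ++ (a :: (mid ++ [b])) ++ B = A ++ a :: (mid ++ b :: B) := by simp
            have h2 : ((A.length : Int)).toNat = A.length := by simp
            rw [h1, h2, set_append_length]
            have h3 : A ++ b :: (mid ++ b :: B) = (A ++ b :: mid) ++ b :: B := by simp
            have h4 : ((A.length : Int) + ((a :: (mid ++ [b])).length : Int) - 1).toNat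
                = (A ++ b :: mid).length := by push_cast; simp; omega
            rw [h3, h4, set_append_length]
            simp
          rw [hswap]
          have harg : (A.length : Int) + 1 = ((A ++ [b]).length : Int) := by push_cast; simp
          have harg2 : (A.length : Int) + ((a :: (mid ++ [b])).length : Int) - 1 - 1
              = ((A ++ [b]).length : Int) + (mid.length : Int) - 1 := by push_cast; simp; ring
          rw [harg, harg2, ih mid.length (by simp [← hlen]) mid (A ++ [b]) (a :: B) rfl]
          have hsw := revNS_swap a b mid ha hb
          simp only [List.cons_append] at hsw
          simp [hsw]

theorem solve_alt_eq_revNS (s : String) : solve_alt s = String.ofList (revNS s.toList) := by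
  unfold solve_alt
  have h := loopB_eq s.toList.length s.toList [] [] rfl
  simp only [List.nil_append, List.append_nil, List.length_nil, Nat.cast_zero, zero_add] at h
  rw [h]

-- ===== VERDICT (by name: the statement is the Claim_ definition above) =====
theorem solve_spec : Claim_equal_solve := by
  intro s _
  unfold Spec_solve
  rw [solve_eq_revNS, solve_alt_eq_revNS]
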